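-- pv_equiv track=rewrite | github.com/NiteshShivam/Programming | Hash/Find the number of tabs opened.py | countTabs
-- ===== SOURCE A (Python) =====
-- def countTabs(arr):
--     s = set()
--     for each in arr:
--         if each=='END':
--             s.clear()
--         elif each in s:
--             s.remove(each)
--         else:
--             s.add(each)
--     return len(s)
-- ===== SOURCE B (Python) =====
-- def countTabs(arr):
--     if 'END' in arr:
--         last = len(arr) - 1 - arr[::-1].index('END')
--         tail = arr[last + 1:]
--     else:
--         tail = arr
--     counts = {}
--     for x in tail:
--         counts[x] = counts.get(x, 0) + 1
--     return sum(v % 2 for v in counts.values())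
-- ===== Notes on version B (the rewrite author's own statement) =====
-- stated objective: alternative
-- what changed: Instead of simulating the toggle/clear set over the whole array, B slices off the suffix after the last 'END', builds a dict of occurrence counts over that suffix once, and returns the number of keys with odd count.
import Mathlib
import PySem

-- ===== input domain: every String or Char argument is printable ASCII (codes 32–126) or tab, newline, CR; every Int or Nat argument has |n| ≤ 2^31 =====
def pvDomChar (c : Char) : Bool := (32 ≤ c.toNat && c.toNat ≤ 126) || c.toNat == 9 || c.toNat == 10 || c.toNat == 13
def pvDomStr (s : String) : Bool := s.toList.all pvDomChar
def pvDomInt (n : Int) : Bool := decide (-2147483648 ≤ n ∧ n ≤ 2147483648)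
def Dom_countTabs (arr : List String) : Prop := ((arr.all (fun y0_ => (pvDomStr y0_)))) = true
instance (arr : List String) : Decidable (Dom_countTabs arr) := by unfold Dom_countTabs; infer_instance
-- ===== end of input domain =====

-- B replaces A's toggle/clear set simulation by: take the suffix after the last 'END',
-- count occurrences in a dict, return the number of keys with odd count (objective: alternative).

-- ===== PORT A =====
-- s.remove(each) is guarded by 'each in s', so remove? is always 'some' there; getD s is unreachable.
def countTabs (arr : List String) : Int :=
  let s := arr.foldl (fun s each =>
      if each == "END" then PySem.Set.empty
      else if PySem.Set.contains s each then (PySem.Set.remove? s each).getD s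
      else PySem.Set.add s each) PySem.Set.empty
  PySem.Set.len s

-- ===== PORT B =====
-- arr[::-1].index('END') is guarded by "'END' in arr", so index? is always 'some' there; getD 0 is unreachable.
def countTabs_alt (arr : List String) : Int :=
  let tail :=
    if arr.contains "END" then
      let rev := (PySem.List.slice? arr none none (-1)).getD []
      let last : Int := (arr.length : Int) - 1 - ((PySem.List.index? rev "END").getD 0 : Int)
      PySem.List.slice arr (some (last + 1)) none
    else arr
  let counts := tail.foldl (fun d x => d.modify x 0 (· + 1)) (PySem.Dict.empty : PySem.Dict String Int)
  (counts.values.map (fun v => PySem.Int.mod v 2)).sum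

-- ===== PRECONDITION & SPEC =====
def Spec_countTabs (arr : List String) (out : Int) : Prop := out = countTabs_alt arr
instance (arr : List String) (out : Int) : Decidable (Spec_countTabs arr out) := by unfold Spec_countTabs; infer_instance

-- ===== CLAIM (what is proved, stated in full; the proofs are below) =====
def Claim_equal_countTabs : Prop := ∀ (arr : List String), Dom_countTabs arr → Spec_countTabs arr (countTabs arr)

-- ===== LEMMAS AND PROOFS =====

-- A's loop body, named for the proofs.
def tabStep (s : PySem.Set String) (each : String) : PySem.Set String :=
  if each == "END" then PySem.Set.empty
  else if PySem.Set.contains s each then (PySem.Set.remove? s each).getD s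
  else PySem.Set.add s each

-- B's counting phase, named for the proofs.
def oddSum (t : List String) : Int :=
  ((t.foldl (fun d x => d.modify x 0 (· + 1)) (PySem.Dict.empty : PySem.Dict String Int)).values.map
    (fun v => PySem.Int.mod v 2)).sum

lemma countTabs_eq (arr : List String) :
    countTabs arr = ((arr.foldl tabStep PySem.Set.empty).length : Int) := rfl

lemma tabStep_ne (s : PySem.Set String) (a : String) (h : a ≠ "END") :
    tabStep s a = if a ∈ s then PySem.Set.discard s a else PySem.Set.add s a := by
  unfold tabStep
  rw [if_neg (by simp [h])]
  by_cases hm : a ∈ s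
  · rw [if_pos hm, if_pos (by rwa [PySem.Set.contains_iff]), PySem.Set.remove?_of_mem hm,
      Option.getD_some]
  · rw [if_neg hm, if_neg (by rw [PySem.Set.contains_iff]; exact hm)]

lemma toggle_mem (s : PySem.Set String) (a : String) (hs : s.Nodup) :
    (if a ∈ s then PySem.Set.discard s a else PySem.Set.add s a).Nodup ∧
    ∀ x, x ∈ (if a ∈ s then PySem.Set.discard s a else PySem.Set.add s a) ↔ (x ∈ s ↔ x ≠ a) := by
  split_ifs with hm
  · refine ⟨PySem.Set.nodup_discard s a hs, fun x => ?_⟩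
    rw [PySem.Set.mem_discard]
    by_cases hx : x = a <;> simp [hx, hm]
  · refine ⟨PySem.Set.nodup_add s a hs, fun x => ?_⟩
    rw [PySem.Set.mem_add]
    by_cases hx : x = a <;> simp [hx, hm]

lemma fold_parity (l : List String) (hE : "END" ∉ l) :
    ∀ s : PySem.Set String, s.Nodup →
      (l.foldl tabStep s).Nodup ∧
      ∀ x, x ∈ l.foldl tabStep s ↔ (x ∈ s ↔ l.count x % 2 = 0) := by
  induction l with
  | nil => exact fun s hs => ⟨hs, fun x => by simp⟩
  | cons a t ih =>
    intro s hs
    have ha : a ≠ "END" := by rintro rfl; exact hE (by simp)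
    have hE' : "END" ∉ t := fun hmem => hE (by simp [hmem])
    rw [List.foldl_cons, tabStep_ne s a ha]
    obtain ⟨hn, hmem⟩ := toggle_mem s a hs
    obtain ⟨hn', hmem'⟩ := ih hE' _ hn
    refine ⟨hn', fun x => ?_⟩
    rw [hmem' x, hmem x]
    by_cases hx : x = a
    · subst hx
      have hc : (x :: t).count x = t.count x + 1 := by simp
      rw [hc]
      have h2 : (t.count x + 1) % 2 = 0 ↔ ¬ (t.count x % 2 = 0) := by omega
      rw [h2]
      tauto
    · have hc : (a :: t).count x = t.count x := by
        simp [List.count_cons]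
        exact fun h2 => hx h2.symm
      rw [hc]
      tauto

lemma fold_reset (p t : List String) (s : PySem.Set String) :
    ((p ++ "END" :: t).foldl tabStep s) = t.foldl tabStep PySem.Set.empty := by
  rw [List.foldl_append, List.foldl_cons]
  have h : tabStep (p.foldl tabStep s) "END" = PySem.Set.empty := by simp [tabStep]
  rw [h]

lemma exists_split {arr : List String} (h : "END" ∈ arr) :
    ∃ p t : List String, arr = p ++ "END" :: t ∧ "END" ∉ t := by
  have h1 : ("END" : String) ∈ arr.reverse := by simpa using h
  have h2 : (PySem.List.index? arr.reverse "END").isSome :=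
    (PySem.List.index?_isSome_iff arr.reverse "END").mpr h1
  obtain ⟨j, hj⟩ := Option.isSome_iff_exists.mp h2
  obtain ⟨pre, suf, hsplit, -, hpre⟩ := (PySem.List.index?_eq_some_iff arr.reverse "END" j).mp hj
  refine ⟨suf.reverse, pre.reverse, ?_, by simpa using hpre⟩
  have h3 := congrArg List.reverse hsplit
  rw [List.reverse_reverse] at h3
  rw [h3]
  simp [List.reverse_append]

lemma core (t : List String) (ht : "END" ∉ t) :
    ((t.foldl tabStep PySem.Set.empty).length : Int) = oddSum t := by
  obtain ⟨hn, hmem⟩ := fold_parity t ht PySem.Set.empty List.nodup_nil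
  have hmem' : ∀ x, x ∈ t.foldl tabStep PySem.Set.empty ↔ t.count x % 2 = 1 := by
    intro x
    rw [hmem x]
    have : ¬ (x ∈ (PySem.Set.empty : PySem.Set String)) := by simp [PySem.Set.empty]
    constructor
    · intro hx
      have h0 : ¬ (t.count x % 2 = 0) := fun h0 => this (hx.mpr h0)
      omega
    · intro h1
      constructor
      · intro hx; exact absurd hx this
      · intro h0; omega
  unfold oddSum
  rw [← PySem.Dict.counter_eq_foldl]
  have hv : (PySem.Dict.counter t).values
      = (PySem.Set.ofList t).map (fun k => ((t.count k : Nat) : Int)) := by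
    show ((PySem.Dict.counter t).items).map (fun x => x.2) = _
    rw [PySem.Dict.items_counter]
    simp [List.map_map, Function.comp]
  rw [hv, List.map_map]
  have hmap : ((PySem.Set.ofList t).map ((fun v => PySem.Int.mod v 2) ∘ fun k => ((t.count k : Nat) : Int)))
      = (PySem.Set.ofList t).map (fun k => if (decide (t.count k % 2 = 1)) then (1 : Int) else 0) := by
    apply List.map_congr_left
    intro k _
    have h2 : PySem.Int.mod ((t.count k : Nat) : Int) 2 = ((t.count k % 2 : Nat) : Int) := by
      exact_mod_cast PySem.Int.mod_natCast (t.count k) 2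
    simp only [Function.comp]
    rw [h2]
    rcases Nat.mod_two_eq_zero_or_one (t.count k) with h | h <;> simp [h]
  rw [hmap, PySem.List.sum_map_ite_one_zero]
  congr 1
  rw [List.countP_eq_length_filter]
  have hperm : (t.foldl tabStep PySem.Set.empty).Perm
      ((PySem.Set.ofList t).filter (fun k => decide (t.count k % 2 = 1))) := by
    rw [List.perm_ext_iff_of_nodup hn ((PySem.Set.nodup_ofList t).filter _)]
    intro x
    rw [hmem' x, List.mem_filter, PySem.Set.mem_ofList]
    constructor
    · intro hx
      refine ⟨?_, by simpa using hx⟩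
      have hp : 0 < t.count x := by omega
      exact List.count_pos_iff.mp hp
    · rintro ⟨-, hx⟩
      simpa using hx
  exact hperm.length_eq

lemma alt_of_split (p t : List String) (ht : "END" ∉ t) :
    countTabs_alt (p ++ "END" :: t) = oddSum t := by
  have hrev : (p ++ "END" :: t).reverse = (t.reverse ++ ["END"]) ++ p.reverse := by
    simp [List.reverse_append]
  have hidx : PySem.List.index? ((p ++ "END" :: t).reverse) "END" = some t.length := by
    rw [hrev, PySem.List.index?_append_of_mem p.reverse (by simp),
      PySem.List.index?_append_singleton_self t.reverse "END" (by simpa using ht),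
      List.length_reverse]
  have harg : (((p ++ "END" :: t).length : Int) - 1 - ((t.length : Nat) : Int)) + 1
      = ((p.length + 1 : Nat) : Int) := by
    push_cast
    simp [List.length_append]
    ring
  have hdrop : List.drop (p.length + 1) (p ++ "END" :: t) = t := by
    rw [show p ++ "END" :: t = (p ++ ["END"]) ++ t by simp,
      show p.length + 1 = (p ++ ["END"]).length by simp, List.drop_left]
  simp only [countTabs_alt, PySem.List.slice?_none_none_neg_one, Option.getD_some, hidx]
  rw [if_pos (by simp)]
  rw [harg, PySem.List.slice_from_natCast, hdrop]
  rfl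

lemma alt_no_end (arr : List String) (h : "END" ∉ arr) :
    countTabs_alt arr = oddSum arr := by
  simp only [countTabs_alt]
  rw [if_neg (by simpa using h)]
  rfl

lemma AB (arr : List String) : countTabs arr = countTabs_alt arr := by
  by_cases h : "END" ∈ arr
  · obtain ⟨p, t, rfl, ht⟩ := exists_split h
    rw [countTabs_eq, fold_reset p t, alt_of_split p t ht]
    exact core t ht
  · rw [countTabs_eq, alt_no_end arr h]
    exact core arr h

-- ===== VERDICT (by name: the statement is the Claim_ definition above) =====
theorem countTabs_spec : Claim_equal_countTabs := by
  intro arr _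
  unfold Spec_countTabs
  exact AB arr
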